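-- pv_equiv track=rewrite | github.com/DavidTsyganov/Studying | Poezdka.py | odometer
-- ===== SOURCE A (Python) =====
-- def odometer (oksana):
--     kilom = 0
--     time = 0
--     if len(oksana) % 2 == 0:
--         for j in range (0, len (oksana), 2):
--             kilom += oksana [j] * (oksana [j + 1] - time)
--             time = oksana [j + 1]
--         return kilom
--     else:
--         for j in range (0, len (oksana) - 1, 2):
--             kilom += oksana [j] * (oksana [j + 1] - time)
--             time = oksana [j + 1]
--         return kilom
-- ===== SOURCE B (Python) =====
-- def odometer(oksana):
--     # Summation by parts: sum_i s_i*(t_i - t_{i-1}) == sum_i (s_i - s_{i+1}) * t_i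
--     # (with s beyond the last pair taken as 0), so each absolute time is weighted
--     # by the speed drop at that time; no running previous-time state is needed.
--     times = oksana[1::2]
--     speeds = oksana[0::2][:len(times)]
--     shifted = speeds[1:] + [0]
--     return sum((s - ns) * t for s, ns, t in zip(speeds, shifted, times))
-- ===== Notes on version B (the rewrite author's own statement) =====
-- stated objective: alternative
-- what changed: Replaces A's running previous-time accumulator with a summation-by-parts (Abel) reformulation: B computes sum((s_i - s_{i+1}) * t_i) over the speed slice, its shifted copy padded with 0, and the time slice, so each absolute time is weighted by the speed drop and no previous-time state exists.
import Mathlib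
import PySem

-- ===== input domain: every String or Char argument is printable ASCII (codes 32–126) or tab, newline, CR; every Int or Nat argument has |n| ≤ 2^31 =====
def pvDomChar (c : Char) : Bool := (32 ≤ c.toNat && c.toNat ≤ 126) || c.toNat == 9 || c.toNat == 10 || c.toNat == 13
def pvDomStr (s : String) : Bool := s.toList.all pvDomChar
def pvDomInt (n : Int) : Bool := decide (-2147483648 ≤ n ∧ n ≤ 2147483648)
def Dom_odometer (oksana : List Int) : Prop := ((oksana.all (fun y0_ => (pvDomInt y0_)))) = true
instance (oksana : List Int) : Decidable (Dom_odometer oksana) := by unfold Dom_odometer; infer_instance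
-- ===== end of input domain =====

-- B replaces A's running previous-time accumulator by summation by parts (Abel):
-- Σ sᵢ(tᵢ−tᵢ₋₁) = Σ (sᵢ−sᵢ₊₁)·tᵢ with the speed past the last pair taken as 0.

-- ===== PORT A =====
def odometer (oksana : List Int) : Int :=
  if PySem.Int.mod (oksana.length : Int) 2 == 0 then
    ((PySem.List.pyRange 0 (oksana.length : Int) 2).foldl
      (fun (kt : Int × Int) j =>
        (kt.1 + PySem.List.pyGetD oksana j 0 * (PySem.List.pyGetD oksana (j + 1) 0 - kt.2),
         PySem.List.pyGetD oksana (j + 1) 0)) (0, 0)).1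
  else
    ((PySem.List.pyRange 0 ((oksana.length : Int) - 1) 2).foldl
      (fun (kt : Int × Int) j =>
        (kt.1 + PySem.List.pyGetD oksana j 0 * (PySem.List.pyGetD oksana (j + 1) 0 - kt.2),
         PySem.List.pyGetD oksana (j + 1) 0)) (0, 0)).1

-- ===== PORT B =====
def odometer_alt (oksana : List Int) : Int :=
  let times := (PySem.List.slice? oksana (some 1) none 2).getD []
  let speeds := ((PySem.List.slice? oksana (some 0) none 2).getD []).take times.length
  let shifted := speeds.drop 1 ++ [0]
  (List.zipWith3 (fun s ns t => (s - ns) * t) speeds shifted times).foldl (· + ·) 0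

-- ===== PRECONDITION & SPEC =====
def Spec_odometer (oksana : List Int) (out : Int) : Prop := out = odometer_alt oksana
instance (oksana : List Int) (out : Int) : Decidable (Spec_odometer oksana out) := by unfold Spec_odometer; infer_instance

-- ===== CLAIM (what is proved, stated in full; the proofs are below) =====
def Claim_equal_odometer : Prop := ∀ (oksana : List Int), Dom_odometer oksana → Spec_odometer oksana (odometer oksana)

-- ===== LEMMAS AND PROOFS =====

-- the (speed, time) pairs the input interleaves, in order
def pvPairs : List Int → List (Int × Int)
  | [] => []
  | [_] => []
  | s :: t :: r => (s, t) :: pvPairs r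

-- first speed of a pair list (0 when empty)
def pvHd : List (Int × Int) → Int
  | [] => 0
  | (s, _) :: _ => s

-- B's Abel-transformed sum over a pair list
def pvH : List (Int × Int) → Int
  | [] => 0
  | (s, t) :: P => (s - pvHd P) * t + pvH P

-- the stride-2 slices of a two-longer list peel off its first pair
theorem pv_slice0_cons (a b : Int) (r : List Int) :
    PySem.List.slice? (a :: b :: r) (some 0) none 2 =
      some (a :: (PySem.List.slice? r (some 0) none 2).getD []) := by
  simp only [PySem.List.slice?, PySem.List.sliceIndices]
  norm_num
  have hmin : min (0:Int) ((r.length:Int) + 1 + 1) = 0 := by omega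
  simp only [hmin]
  have hc : (if (0:Int) ≤ (r.length:Int) + 1 then (((r.length:Int) + 1 + 1 - 0 + 2 - 1) / 2).toNat else 0)
      = (if 0 < r.length then (((r.length:Int) + 2 - 1) / 2).toNat else 0) + 1 := by
    split_ifs <;> omega
  rw [hc, List.range_succ_eq_map, List.filterMap_cons, List.filterMap_map]
  norm_num
  refine List.filterMap_congr (fun x _ => ?_)
  have h2 : ((2:Int) * ((x:Int) + 1)).toNat = 2 * x + 1 + 1 := by omega
  have h3 : ((2:Int) * (x:Int)).toNat = 2 * x := by omega
  rw [h2, h3, List.getElem?_cons_succ, List.getElem?_cons_succ]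

theorem pv_slice1_cons (a b : Int) (r : List Int) :
    PySem.List.slice? (a :: b :: r) (some 1) none 2 =
      some (b :: (PySem.List.slice? r (some 1) none 2).getD []) := by
  simp only [PySem.List.slice?, PySem.List.sliceIndices]
  norm_num
  have hmin : min (1:Int) ((r.length:Int) + 1 + 1) = 1 := by omega
  simp only [hmin]
  rcases r with _ | ⟨c, r'⟩
  · rfl
  · have hmin2 : min (1:Int) (((c :: r').length : Int)) = 1 := by simp
    simp only [hmin2]
    have hc : ((((c :: r').length : Int) + 1 + 1 - 1 + 2 - 1) / 2).toNat
        = (if 1 < (c :: r').length then ((((c :: r').length : Int) - 1 + 2 - 1) / 2).toNat else 0) + 1 := by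
      simp only [List.length_cons] at *
      split_ifs <;> omega
    rw [hc, List.range_succ_eq_map, List.filterMap_cons, List.filterMap_map]
    norm_num
    refine List.filterMap_congr (fun x _ => ?_)
    have h2 : ((1:Int) + 2 * ((x:Int) + 1)).toNat = 2 * x + 1 + 1 + 1 := by omega
    have h3 : ((1:Int) + 2 * (x:Int)).toNat = 2 * x + 1 := by omega
    rw [h2, h3, List.getElem?_cons_succ, List.getElem?_cons_succ]

theorem pv_slice0_one (x : Int) :
    PySem.List.slice? [x] (some 0) none 2 = some [x] := by
  simp only [PySem.List.slice?, PySem.List.sliceIndices]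
  norm_num
  simp

theorem pv_slice1_one (x : Int) :
    PySem.List.slice? [x] (some 1) none 2 = some [] := by
  simp only [PySem.List.slice?, PySem.List.sliceIndices]
  norm_num

-- the odd-index slice is the time column of the pair list
theorem pv_slice1_eq (xs : List Int) :
    (PySem.List.slice? xs (some 1) none 2).getD [] = (pvPairs xs).map Prod.snd := by
  induction xs using pvPairs.induct with
  | case1 => rfl
  | case2 x => rw [pv_slice1_one]; rfl
  | case3 s t r ih => rw [pv_slice1_cons]; simp [pvPairs, ih]

-- the even-index slice truncated to the time column's length is the speed column
theorem pv_slice0_take (xs : List Int) :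
    ((PySem.List.slice? xs (some 0) none 2).getD []).take
        ((pvPairs xs).map Prod.snd).length = (pvPairs xs).map Prod.fst := by
  induction xs using pvPairs.induct with
  | case1 => rfl
  | case2 x => rw [pv_slice0_one]; rfl
  | case3 s t r ih => rw [pv_slice0_cons]; simpa [pvPairs] using ih

-- A's index range in either branch is the stride-2 list 0,2,…
theorem pv_pyRange_two (L : Int) (hL : 0 ≤ L) :
    PySem.List.pyRange 0 L 2 =
      (List.range ((L + 1) / 2).toNat).map (fun (k : Nat) => (2 * (k : Int))) := by
  rw [PySem.List.pyRange_of_pos 0 L (by norm_num)]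
  have hcount : (if (0:Int) < L then ((L - 0 + 2 - 1) / 2).toNat else 0) = ((L + 1) / 2).toNat := by
    split_ifs with h
    · omega
    · have : L = 0 := le_antisymm (not_lt.mp h) hL
      simp [this]
  rw [hcount]
  simp

-- A's fold over the stride-2 indices is the fold over the pair list
theorem pv_foldA (xs : List Int) (tot prev : Int) :
    ((List.range (xs.length / 2)).map (fun (k : Nat) => (2 * (k : Int)))).foldl
        (fun (kt : Int × Int) j =>
          (kt.1 + PySem.List.pyGetD xs j 0 * (PySem.List.pyGetD xs (j + 1) 0 - kt.2),
           PySem.List.pyGetD xs (j + 1) 0)) (tot, prev)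
      = (pvPairs xs).foldl
          (fun (tp : Int × Int) st => (tp.1 + st.1 * (st.2 - tp.2), st.2)) (tot, prev) := by
  induction xs using pvPairs.induct generalizing tot prev with
  | case1 => rfl
  | case2 x => norm_num [pvPairs]
  | case3 s t r ih =>
    have hlen : (s :: t :: r).length / 2 = r.length / 2 + 1 := by simp; omega
    rw [hlen, List.range_succ_eq_map, pvPairs]
    simp only [List.map_cons, List.foldl_cons, Nat.cast_zero, mul_zero, zero_add,
      PySem.List.pyGetD_zero, List.getD_cons_zero,
      show PySem.List.pyGetD (s :: t :: r) 1 0 = t from by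
        simpa using PySem.List.pyGetD_ofNat' (s :: t :: r) 1 0]
    rw [← ih (tot + s * (t - prev)) t]
    simp only [List.foldl_map]
    congr 1
    funext kt k
    have e1 : (2 : Int) * ((k.succ : Nat) : Int) + 1 = ((2 * k + 3 : Nat) : Int) := by push_cast; ring
    have e0 : (2 : Int) * ((k.succ : Nat) : Int) = ((2 * k + 2 : Nat) : Int) := by push_cast; ring
    have f1 : (2 : Int) * ((k : Nat) : Int) + 1 = ((2 * k + 1 : Nat) : Int) := by push_cast; ring
    have f0 : (2 : Int) * ((k : Nat) : Int) = ((2 * k : Nat) : Int) := by push_cast; ring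
    rw [e1, e0, f1, f0]
    simp only [PySem.List.pyGetD_natCast]
    rw [show 2 * k + 3 = (2 * k + 1) + 1 + 1 from rfl,
        show 2 * k + 2 = 2 * k + 1 + 1 from rfl]
    simp

-- summation by parts: A's pair fold equals B's Abel sum (minus the initial-time term)
theorem pv_abel (P : List (Int × Int)) (tot prev : Int) :
    ((P.foldl (fun (tp : Int × Int) st => (tp.1 + st.1 * (st.2 - tp.2), st.2)) (tot, prev)).1)
      = tot + pvH P - pvHd P * prev := by
  induction P generalizing tot prev with
  | nil => simp [pvH, pvHd]
  | cons st P ih =>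
    obtain ⟨s, t⟩ := st
    simp only [List.foldl_cons, ih, pvH, pvHd]
    ring

-- B's zipWith3 sum over the columns of a pair list computes pvH
theorem pv_foldB (P : List (Int × Int)) (acc : Int) :
    (List.zipWith3 (fun s ns t => (s - ns) * t)
        (P.map Prod.fst) ((P.map Prod.fst).drop 1 ++ [0]) (P.map Prod.snd)).foldl
      (· + ·) acc = acc + pvH P := by
  induction P generalizing acc with
  | nil => simp [pvH]
  | cons st P ih =>
    obtain ⟨s, t⟩ := st
    cases P with
    | nil => simp [pvH, pvHd, List.zipWith3]
    | cons st' P' =>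
      obtain ⟨s', t'⟩ := st'
      simp only [List.map_cons, List.drop_succ_cons, List.drop_zero, List.cons_append,
        List.zipWith3, List.foldl_cons]
      simp only [List.map_cons, List.drop_succ_cons, List.drop_zero] at ih
      rw [ih]
      simp only [pvH, pvHd]
      ring

-- ===== VERDICT (by name: the statement is the Claim_ definition above) =====
theorem odometer_spec : Claim_equal_odometer := by
  intro oksana _
  unfold Spec_odometer odometer odometer_alt
  simp only [pv_slice1_eq, pv_slice0_take]
  rw [pv_foldB, zero_add]
  have hn : (0:Int) ≤ (oksana.length : Int) := by positivity
  by_cases h : oksana.length % 2 = 0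
  · have hmod : PySem.Int.mod (oksana.length : Int) 2 = 0 := by
      rw [show ((2:Int)) = ((2:Nat):Int) from rfl, PySem.Int.mod_natCast, h]; rfl
    simp only [hmod, beq_self_eq_true, if_true]
    rw [pv_pyRange_two _ hn,
        show (((oksana.length : Int) + 1) / 2).toNat = oksana.length / 2 by omega,
        pv_foldA, pv_abel]
    ring
  · have hmod : PySem.Int.mod (oksana.length : Int) 2 = 1 := by
      rw [show ((2:Int)) = ((2:Nat):Int) from rfl, PySem.Int.mod_natCast]
      omega
    simp only [hmod]
    norm_num
    rw [pv_pyRange_two _ (by omega),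
        show (((oksana.length : Int) - 1 + 1) / 2).toNat = oksana.length / 2 by omega,
        pv_foldA, pv_abel]
    ring
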